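-- pv_equiv track=rewrite | github.com/masterhung0112/ticket-reservation | server/ticket/seat_allocation.py | mapReservedSeatsToArray
-- ===== SOURCE A (Python) =====
-- from typing import List, Tuple, Optional
--
-- def mapReservedSeatsToArray(allSeatRowCount: int, reservedSeats: List[str], lotSize: List[int] = [2, 4, 2]) -> List[List[int]]:
--     """
--     With paramsters (1, ["1A", "1B"]), the method returns [ [ [0, 1], [], [] ] ]
--     With paramsters (2, ["1A", "2A", "2B"]), the method returns [
--         [[0], [], [] ],
--         [[0, 1]], [], [] ]
--     ]
--     """
--     # Generate 3-dimentional array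
--     allSeats = [[[] for _ in lotSize] for _ in range(allSeatRowCount)]
--
--     # Calculate the maximum number of seats in a row
--     maxSeatsInRow = 0
--     for lot in lotSize:
--         maxSeatsInRow += lot
--
--     for s in reservedSeats:
--         # assume that there is only two letters
--         if len(s) != 2:
--             raise Exception(f"Invalid seat ID {s}")
--
--         seatRow = int(s[0]) - 1
--         if seatRow >= allSeatRowCount:
--             raise Exception(f"Invalid seat row {seatRow}, we have {allSeatRowCount} rows")
--
--         seatName = s[1]
--         seatNameIndex = ord(seatName) - ord('A')
--         if seatRow < 0 or seatNameIndex < 0: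
--             raise Exception(f"Invalid seat name {s}")
--
--         # Assume the max letter for column is 'H', but we get the value 'I', then raise then exception
--         if seatNameIndex >= maxSeatsInRow:
--             raise Exception(f"The seat column {seatName} -> {seatNameIndex} exceeds the max column number {maxSeatsInRow}")
--
--         seatLotIndex = 0
--         sumLot = 0
--         for lot in lotSize:
--             if seatNameIndex >= (sumLot + lot):
--                 seatLotIndex += 1
--                 sumLot = sumLot + lot
--             else:
--                 break
--
--         # Append the
--         finalSeatNameIndex = seatNameIndex - sumLot
--         if finalSeatNameIndex not in allSeats[seatRow][seatLotIndex]: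
--             allSeats[seatRow][seatLotIndex].append(finalSeatNameIndex)
--
--     # Sort the reserved seats in order
--     for seatRow in allSeats:
--         for seatLot in seatRow:
--             seatLot.sort()
--
--     return allSeats
-- ===== SOURCE B (Python) =====
-- from typing import List, Tuple, Optional
--
-- def mapReservedSeatsToArray(allSeatRowCount: int, reservedSeats: List[str], lotSize: List[int] = [2, 4, 2]) -> List[List[int]]:
--     # Precompute the lot boundaries once, parse every seat into a (row, lot, offset)
--     # triple via a lookup over those boundaries, then build the 3D array functionally
--     # (per-cell set comprehension + sorted) instead of mutating a preallocated array.
--     bounds = []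
--     start = 0
--     for lot in lotSize:
--         bounds.append((start, start + lot))
--         start += lot
--     total = start
--
--     triples = []
--     for s in reservedSeats:
--         if len(s) != 2:
--             raise Exception(f"Invalid seat ID {s}")
--         seatRow = int(s[0]) - 1
--         if seatRow >= allSeatRowCount:
--             raise Exception(f"Invalid seat row {seatRow}, we have {allSeatRowCount} rows")
--         seatName = s[1]
--         col = ord(seatName) - ord('A')
--         if seatRow < 0 or col < 0:
--             raise Exception(f"Invalid seat name {s}")
--         if col >= total:
--             raise Exception(f"The seat column {seatName} -> {col} exceeds the max column number {total}")
--         k, (lo, _hi) = next((i, b) for i, b in enumerate(bounds) if col < b[1])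
--         triples.append((seatRow, k, col - lo))
--
--     return [[sorted({c for (r, l, c) in triples if r == row and l == lot})
--              for lot in range(len(lotSize))]
--             for row in range(allSeatRowCount)]
-- ===== Notes on version B (the rewrite author's own statement) =====
-- stated objective: alternative
-- what changed: B precomputes the lot boundary intervals once and parses each seat into a (row, lot, offset) triple via a lookup over those boundaries, then builds the 3D array functionally with per-cell set comprehensions and sorted(), instead of A's per-seat running-sum inner loop and in-place mutation of a preallocated nested array with a membership-scan append.
import Mathlib
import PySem

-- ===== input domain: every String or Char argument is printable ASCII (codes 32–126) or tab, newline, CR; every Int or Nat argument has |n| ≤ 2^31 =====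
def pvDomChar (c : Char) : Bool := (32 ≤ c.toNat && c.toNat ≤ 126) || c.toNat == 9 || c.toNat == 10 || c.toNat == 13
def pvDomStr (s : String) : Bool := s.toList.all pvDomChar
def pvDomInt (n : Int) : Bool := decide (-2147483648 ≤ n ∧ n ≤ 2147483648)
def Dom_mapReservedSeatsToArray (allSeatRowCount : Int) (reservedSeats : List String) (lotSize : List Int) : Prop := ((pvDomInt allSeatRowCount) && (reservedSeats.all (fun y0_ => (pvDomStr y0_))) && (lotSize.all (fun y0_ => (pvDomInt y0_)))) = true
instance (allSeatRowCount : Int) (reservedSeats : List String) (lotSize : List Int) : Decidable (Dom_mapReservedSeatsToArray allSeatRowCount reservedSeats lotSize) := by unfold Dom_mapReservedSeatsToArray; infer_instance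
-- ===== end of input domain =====

-- B replaces A's per-seat running-sum lot scan and in-place 3D mutation by precomputed
-- lot boundaries, a (row, lot, offset) triple per seat, and a functional per-cell
-- set-comprehension build (objective: alternative; equal cost, return values proved equal on Pre_).

-- ===== PORT A =====
-- allSeats = [[[] for _ in lotSize] for _ in range(allSeatRowCount)]
def pvAInit (n : Int) (lots : List Int) : List (List (List Int)) :=
  (PySem.List.pyRange 0 n 1).map (fun _ => lots.map (fun _ => ([] : List Int)))

-- the inner 'for lot in lotSize: if seatNameIndex >= sumLot + lot: … else: break' loop
def pvALotLoop (c : Int) : List Int → Int → Int → Int × Int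
  | [], i, s => (i, s)
  | lot :: rest, i, s => if c ≥ s + lot then pvALotLoop c rest (i + 1) (s + lot) else (i, s)

-- one iteration of A's seat loop; none = the corresponding 'raise'
def pvAStep (n total : Int) (lots : List Int) (st : List (List (List Int))) (s : String) :
    Option (List (List (List Int))) :=
  match s.toList with
  | [c0, c1] =>
    match PySem.Int.ofChars? [c0] with
    | none => none
    | some v =>
      let row := v - 1
      if row ≥ n then none
      else
        let col : Int := (c1.toNat : Int) - 65
        if row < 0 ∨ col < 0 then none
        else if col ≥ total then none
        else
          let p := pvALotLoop col lots 0 0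
          let fin := col - p.2
          let rowList := PySem.List.pyGetD st row []
          let cell := PySem.List.pyGetD rowList p.1 []
          let cell' := if fin ∈ cell then cell else cell ++ [fin]
          some (PySem.List.pySetD st row (PySem.List.pySetD rowList p.1 cell'))
  | _ => none

def mapReservedSeatsToArray (allSeatRowCount : Int) (reservedSeats : List String) (lotSize : List Int) : List (List (List Int)) :=
  let total := lotSize.foldl (fun acc lot => acc + lot) 0
  match reservedSeats.foldl
      (fun ost s => ost.bind (fun st => pvAStep allSeatRowCount total lotSize st s))
      (some (pvAInit allSeatRowCount lotSize)) with
  | none => []   -- a raise was hit; these inputs are excluded by Pre_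
  | some st => st.map (fun row => row.map (fun cell => PySem.List.sorted cell (fun x => x) false))

-- ===== PORT B =====
-- bounds/start loop: bounds.append((start, start+lot)); start += lot
def pvBBounds (lotSize : List Int) : Int × List (Int × Int) :=
  lotSize.foldl (fun p lot => (p.1 + lot, p.2 ++ [(p.1, p.1 + lot)])) (0, [])

-- next((i, b) for i, b in enumerate(bounds) if col < b[1]); the [] case is Python's
-- StopIteration, unreachable after the col < total check
def pvBFind (c : Int) : List (Int × Int) → Int → Int × (Int × Int)
  | [], i => (i, (0, 0))
  | b :: rest, i => if c < b.2 then (i, b) else pvBFind c rest (i + 1)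

-- one iteration of B's parse loop; none = the corresponding 'raise'
def pvBParse (n total : Int) (bounds : List (Int × Int)) (s : String) : Option (Int × Int × Int) :=
  match s.toList with
  | [c0, c1] =>
    match PySem.Int.ofChars? [c0] with
    | none => none
    | some v =>
      let row := v - 1
      if row ≥ n then none
      else
        let col : Int := (c1.toNat : Int) - 65
        if row < 0 ∨ col < 0 then none
        else if col ≥ total then none
        else
          let f := pvBFind col bounds 0
          some (row, f.1, col - f.2.1)
  | _ => none

def mapReservedSeatsToArray_alt (allSeatRowCount : Int) (reservedSeats : List String) (lotSize : List Int) : List (List (List Int)) :=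
  let tb := pvBBounds lotSize
  match reservedSeats.foldl
      (fun ots s => ots.bind (fun ts => (pvBParse allSeatRowCount tb.1 tb.2 s).map (fun t => ts ++ [t])))
      (some []) with
  | none => []   -- a raise was hit; these inputs are excluded by Pre_
  | some ts =>
    (PySem.List.pyRange 0 allSeatRowCount 1).map (fun row =>
      (PySem.List.pyRange 0 (lotSize.length : Int) 1).map (fun lot =>
        PySem.List.sorted
          (PySem.Set.ofList ((ts.filter (fun t => t.1 = row ∧ t.2.1 = lot)).map (fun t => t.2.2)))
          (fun x => x) false))

-- ===== PRECONDITION & SPEC =====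
-- A valid seat string: exactly two chars, first a digit '1'..'9' naming a row below
-- allSeatRowCount, second ≥ 'A' and within the total number of seats in a row.
def pvSeatOK (n total : Int) (s : String) : Bool :=
  match s.toList with
  | [c0, c1] =>
    (['1', '2', '3', '4', '5', '6', '7', '8', '9'].contains c0)
      && decide ((c0.toNat : Int) - 49 < n)
      && decide ('A' ≤ c1)
      && decide ((c1.toNat : Int) - 65 < total)
  | _ => false

-- Pre_ = exactly the inputs where Python A raises no exception (every seat ID is valid).
def Pre_mapReservedSeatsToArray (allSeatRowCount : Int) (reservedSeats : List String) (lotSize : List Int) : Prop :=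
  ∀ s ∈ reservedSeats, pvSeatOK allSeatRowCount lotSize.sum s = true

instance (allSeatRowCount : Int) (reservedSeats : List String) (lotSize : List Int) : Decidable (Pre_mapReservedSeatsToArray allSeatRowCount reservedSeats lotSize) := by unfold Pre_mapReservedSeatsToArray; infer_instance

def pvWitness_mapReservedSeatsToArray : Int × List String × List Int :=
  (2, ["1A", "2C", "2A", "1B", "2C"], [2, 4, 2])

def Spec_mapReservedSeatsToArray (allSeatRowCount : Int) (reservedSeats : List String) (lotSize : List Int) (out : List (List (List Int))) : Prop := out = mapReservedSeatsToArray_alt allSeatRowCount reservedSeats lotSize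
instance (allSeatRowCount : Int) (reservedSeats : List String) (lotSize : List Int) (out : List (List (List Int))) : Decidable (Spec_mapReservedSeatsToArray allSeatRowCount reservedSeats lotSize out) := by unfold Spec_mapReservedSeatsToArray; infer_instance

-- ===== CLAIM (what is proved, stated in full; the proofs are below) =====
def Claim_equal_mapReservedSeatsToArray : Prop := ∀ (allSeatRowCount : Int) (reservedSeats : List String) (lotSize : List Int), Dom_mapReservedSeatsToArray allSeatRowCount reservedSeats lotSize → Pre_mapReservedSeatsToArray allSeatRowCount reservedSeats lotSize → Spec_mapReservedSeatsToArray allSeatRowCount reservedSeats lotSize (mapReservedSeatsToArray allSeatRowCount reservedSeats lotSize)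

-- ===== LEMMAS AND PROOFS =====

-- the common specification of the lot lookup: (lot index, sum of the lots before it)
def pvLoc (c : Int) : List Int → Int × Int
  | [] => (0, 0)
  | lot :: rest =>
    if c ≥ lot then ((pvLoc (c - lot) rest).1 + 1, (pvLoc (c - lot) rest).2 + lot)
    else (0, 0)

-- the triple a valid seat string parses to
def pvTripOf (lots : List Int) (s : String) : Int × Int × Int :=
  match s.toList with
  | [c0, c1] =>
    ((c0.toNat : Int) - 49,
     (pvLoc ((c1.toNat : Int) - 65) lots).1,
     ((c1.toNat : Int) - 65) - (pvLoc ((c1.toNat : Int) - 65) lots).2)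
  | _ => (0, 0, 0)

-- A's per-triple state update, factored out of pvAStep
def pvUpdate (st : List (List (List Int))) (t : Int × Int × Int) : List (List (List Int)) :=
  let rowList := PySem.List.pyGetD st t.1 []
  let cell := PySem.List.pyGetD rowList t.2.1 []
  let cell' := if t.2.2 ∈ cell then cell else cell ++ [t.2.2]
  PySem.List.pySetD st t.1 (PySem.List.pySetD rowList t.2.1 cell')

theorem pvFoldlAdd (lots : List Int) (s : Int) :
    lots.foldl (fun acc lot => acc + lot) s = s + lots.sum := by
  induction lots generalizing s with
  | nil => simp
  | cons lot rest ih => simp [List.foldl_cons, ih]; ring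

theorem pvALotLoop_eq (c : Int) (lots : List Int) (i s : Int) :
    pvALotLoop c lots i s = (i + (pvLoc (c - s) lots).1, s + (pvLoc (c - s) lots).2) := by
  induction lots generalizing i s with
  | nil => simp [pvALotLoop, pvLoc]
  | cons lot rest ih =>
    simp only [pvALotLoop, pvLoc]
    by_cases h : c ≥ s + lot
    · rw [if_pos h, if_pos (by omega : c - s ≥ lot), ih]
      have he : c - (s + lot) = c - s - lot := by ring
      rw [he]; simp only [Prod.mk.injEq]; omega
    · rw [if_neg h, if_neg (by omega : ¬ c - s ≥ lot)]
      simp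

def pvBoundsAux : List Int → Int → List (Int × Int)
  | [], _ => []
  | lot :: rest, s => (s, s + lot) :: pvBoundsAux rest (s + lot)

theorem pvBBoundsAux_eq (lots : List Int) (s : Int) (acc : List (Int × Int)) :
    lots.foldl (fun p lot => (p.1 + lot, p.2 ++ [(p.1, p.1 + lot)])) (s, acc)
      = (s + lots.sum, acc ++ pvBoundsAux lots s) := by
  induction lots generalizing s acc with
  | nil => simp [pvBoundsAux]
  | cons lot rest ih => simp [List.foldl_cons, pvBoundsAux, ih]; ring

theorem pvBBounds_eq (lots : List Int) :
    pvBBounds lots = (lots.sum, pvBoundsAux lots 0) := by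
  unfold pvBBounds; rw [pvBBoundsAux_eq]; simp

theorem pvBFind_eq (c : Int) (lots : List Int) (s i : Int)
    (hlo : s ≤ c) (hhi : c < s + lots.sum) :
    (pvBFind c (pvBoundsAux lots s) i).1 = i + (pvLoc (c - s) lots).1 ∧
    (pvBFind c (pvBoundsAux lots s) i).2.1 = s + (pvLoc (c - s) lots).2 := by
  induction lots generalizing s i with
  | nil => simp at hhi; omega
  | cons lot rest ih =>
    simp only [pvBoundsAux, pvBFind, pvLoc]
    by_cases h : c < s + lot
    · rw [if_pos h, if_neg (by omega : ¬ c - s ≥ lot)]; simp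
    · rw [if_neg h, if_pos (by omega : c - s ≥ lot)]
      have := ih (s + lot) (i + 1) (by omega) (by simp at hhi ⊢; omega)
      have he : c - (s + lot) = c - s - lot := by ring
      rw [he] at this
      constructor <;> omega

theorem pvLoc_idx_lt (c : Int) (lots : List Int) (h0 : 0 ≤ c) (h1 : c < lots.sum) :
    0 ≤ (pvLoc c lots).1 ∧ (pvLoc c lots).1 < (lots.length : Int) := by
  induction lots generalizing c with
  | nil => simp at h1; omega
  | cons lot rest ih =>
    simp only [pvLoc]
    by_cases h : c ≥ lot
    · rw [if_pos h]
      have := ih (c - lot) (by omega) (by simp at h1 ⊢; omega)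
      simp; omega
    · rw [if_neg h]; simp

theorem pvOfChars_digit (c0 : Char)
    (h : c0 ∈ ['1', '2', '3', '4', '5', '6', '7', '8', '9']) :
    PySem.Int.ofChars? [c0] = some ((c0.toNat : Int) - 48) := by
  fin_cases h <;> decide

theorem pvSeatOK_elim (n total : Int) (s : String) (hok : pvSeatOK n total s = true) :
    ∃ c0 c1, s.toList = [c0, c1] ∧ c0 ∈ ['1', '2', '3', '4', '5', '6', '7', '8', '9'] ∧
      49 ≤ c0.toNat ∧ c0.toNat ≤ 57 ∧ (c0.toNat : Int) - 49 < n ∧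
      65 ≤ c1.toNat ∧ (c1.toNat : Int) - 65 < total := by
  unfold pvSeatOK at hok
  rcases hsl : s.toList with _ | ⟨c0, _ | ⟨c1, _ | ⟨c2, tl⟩⟩⟩ <;> rw [hsl] at hok <;> simp at hok
  obtain ⟨⟨⟨hmem, hrow⟩, hc1⟩, hcol⟩ := hok
  have hmem' : c0 ∈ ['1', '2', '3', '4', '5', '6', '7', '8', '9'] := by simpa using hmem
  have h49 : 49 ≤ c0.toNat ∧ c0.toNat ≤ 57 := by fin_cases hmem' <;> decide
  have h65 : 65 ≤ c1.toNat := by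
    rw [Char.le_def, UInt32.le_iff_toNat_le] at hc1
    exact hc1
  exact ⟨c0, c1, rfl, hmem', h49.1, h49.2, hrow, h65, hcol⟩

-- a valid seat makes A's step a pvUpdate by its triple and B's parse that triple
theorem pvAStep_ok (n : Int) (lots : List Int) (st : List (List (List Int))) (s : String)
    (hok : pvSeatOK n lots.sum s = true) :
    pvAStep n (lots.foldl (fun acc lot => acc + lot) 0) lots st s
      = some (pvUpdate st (pvTripOf lots s)) := by
  obtain ⟨c0, c1, hsl, hmem, h49, h57, hrow, h65, hcol⟩ := pvSeatOK_elim n lots.sum s hok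
  simp only [pvAStep, pvUpdate, pvTripOf, hsl, pvOfChars_digit c0 hmem]
  rw [pvFoldlAdd, pvALotLoop_eq]
  have he1 : (c0.toNat : Int) - 48 - 1 = (c0.toNat : Int) - 49 := by ring
  rw [if_neg (by omega : ¬ (c0.toNat : Int) - 48 - 1 ≥ n),
      if_neg (by omega : ¬ ((c0.toNat : Int) - 48 - 1 < 0 ∨ (c1.toNat : Int) - 65 < 0)),
      if_neg (by omega : ¬ (c1.toNat : Int) - 65 ≥ 0 + lots.sum)]
  simp only [he1, sub_zero, zero_add]

theorem pvBParse_ok (n : Int) (lots : List Int) (s : String)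
    (hok : pvSeatOK n lots.sum s = true) :
    pvBParse n (pvBBounds lots).1 (pvBBounds lots).2 s = some (pvTripOf lots s) := by
  obtain ⟨c0, c1, hsl, hmem, h49, h57, hrow, h65, hcol⟩ := pvSeatOK_elim n lots.sum s hok
  simp only [pvBParse, pvTripOf, hsl, pvOfChars_digit c0 hmem, pvBBounds_eq]
  have hf := pvBFind_eq ((c1.toNat : Int) - 65) lots 0 0 (by omega) (by omega)
  have he1 : (c0.toNat : Int) - 48 - 1 = (c0.toNat : Int) - 49 := by ring
  rw [if_neg (by omega : ¬ (c0.toNat : Int) - 48 - 1 ≥ n),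
      if_neg (by omega : ¬ ((c0.toNat : Int) - 48 - 1 < 0 ∨ (c1.toNat : Int) - 65 < 0)),
      if_neg (by omega : ¬ (c1.toNat : Int) - 65 ≥ lots.sum)]
  simp only [he1]
  rw [hf.1, hf.2]
  simp

-- the parsed triple is in range
theorem pvTripOf_range (n : Int) (lots : List Int) (s : String)
    (hok : pvSeatOK n lots.sum s = true) :
    0 ≤ (pvTripOf lots s).1 ∧ (pvTripOf lots s).1 < n ∧
    0 ≤ (pvTripOf lots s).2.1 ∧ (pvTripOf lots s).2.1 < (lots.length : Int) := by
  obtain ⟨c0, c1, hsl, hmem, h49, h57, hrow, h65, hcol⟩ := pvSeatOK_elim n lots.sum s hok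
  simp only [pvTripOf, hsl]
  have hloc := pvLoc_idx_lt ((c1.toNat : Int) - 65) lots (by omega) (by omega)
  exact ⟨by omega, by omega, hloc.1, hloc.2⟩

-- A's Option fold under Pre_ is the plain fold of pvUpdate over the parsed triples
theorem pvAFold_ok (n : Int) (lots : List Int) (seats : List String)
    (hok : ∀ s ∈ seats, pvSeatOK n lots.sum s = true)
    (st : List (List (List Int))) :
    seats.foldl (fun ost s => ost.bind (fun st' => pvAStep n (lots.foldl (fun acc lot => acc + lot) 0) lots st' s)) (some st)
      = some ((seats.map (pvTripOf lots)).foldl pvUpdate st) := by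
  induction seats generalizing st with
  | nil => simp
  | cons s rest ih =>
    simp only [List.foldl_cons, List.map_cons, Option.bind_some]
    rw [pvAStep_ok n lots st s (hok s (by simp))]
    exact ih (fun s' hs' => hok s' (by simp [hs'])) _

-- B's Option fold under Pre_ collects exactly the parsed triples
theorem pvBFold_ok (n : Int) (lots : List Int) (seats : List String)
    (hok : ∀ s ∈ seats, pvSeatOK n lots.sum s = true)
    (acc : List (Int × Int × Int)) :
    seats.foldl (fun ots s => ots.bind (fun ts => (pvBParse n (pvBBounds lots).1 (pvBBounds lots).2 s).map (fun t => ts ++ [t]))) (some acc)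
      = some (acc ++ seats.map (pvTripOf lots)) := by
  induction seats generalizing acc with
  | nil => simp
  | cons s rest ih =>
    simp only [List.foldl_cons, List.map_cons, Option.bind_some]
    rw [pvBParse_ok n lots s (hok s (by simp))]
    simp only [Option.map_some]
    rw [ih (fun s' hs' => hok s' (by simp [hs'])) (acc ++ [pvTripOf lots s])]
    simp

-- shape preservation of the triple fold
theorem pvUpdate_shape (n : Int) (L : Nat) (st : List (List (List Int))) (t : Int × Int × Int)
    (hlen : (st.length : Int) = n) (hrow : ∀ row ∈ st, row.length = L)
    (ht : 0 ≤ t.1 ∧ t.1 < n ∧ 0 ≤ t.2.1 ∧ t.2.1 < (L : Int)) :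
    ((pvUpdate st t).length : Int) = n ∧ ∀ row ∈ pvUpdate st t, row.length = L := by
  obtain ⟨h1, h1', h2, h2'⟩ := ht
  have hlt : t.1 < (st.length : Int) := by omega
  have hrl : PySem.List.pyGetD st t.1 [] = st[t.1.toNat]'(by omega) :=
    PySem.List.pyGetD_eq_getElem st [] h1 hlt
  have hrlen : (PySem.List.pyGetD st t.1 []).length = L := by
    rw [hrl]; exact hrow _ (List.getElem_mem _)
  constructor
  · unfold pvUpdate; rw [PySem.List.length_pySetD]; exact hlen
  · intro row hmem
    unfold pvUpdate at hmem
    rw [PySem.List.pySetD_of_nonneg _ _ h1] at hmem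
    rcases List.mem_or_eq_of_mem_set hmem with h | h
    · exact hrow row h
    · rw [h, PySem.List.length_pySetD]; exact hrlen

theorem pvFold_shape (n : Int) (L : Nat) (ts : List (Int × Int × Int))
    (hts : ∀ t ∈ ts, 0 ≤ t.1 ∧ t.1 < n ∧ 0 ≤ t.2.1 ∧ t.2.1 < (L : Int))
    (st : List (List (List Int)))
    (hlen : (st.length : Int) = n) (hrow : ∀ row ∈ st, row.length = L) :
    ((ts.foldl pvUpdate st).length : Int) = n ∧
    ∀ row ∈ ts.foldl pvUpdate st, row.length = L := by
  induction ts generalizing st with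
  | nil => exact ⟨hlen, hrow⟩
  | cons t rest ih =>
    simp only [List.foldl_cons]
    have h := pvUpdate_shape n L st t hlen hrow (hts t (by simp))
    exact ih (fun t' ht' => hts t' (by simp [ht'])) _ h.1 h.2

-- the cell invariant: one update touches exactly one cell
theorem pvUpdate_cell (st : List (List (List Int))) (t : Int × Int × Int) (L : Nat)
    (hrow : ∀ row ∈ st, row.length = L)
    (h1 : 0 ≤ t.1) (h1' : t.1 < (st.length : Int))
    (h2 : 0 ≤ t.2.1) (h2' : t.2.1 < (L : Int))
    (r l : Int) (hr : 0 ≤ r) (hr' : r < (st.length : Int)) (hl : 0 ≤ l) (hl' : l < (L : Int)) :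
    PySem.List.pyGetD (PySem.List.pyGetD (pvUpdate st t) r []) l []
      = if t.1 = r ∧ t.2.1 = l then
          (let c := PySem.List.pyGetD (PySem.List.pyGetD st r []) l []
           if t.2.2 ∈ c then c else c ++ [t.2.2])
        else PySem.List.pyGetD (PySem.List.pyGetD st r []) l [] := by
  obtain ⟨ti, tj, tv⟩ := t
  simp only at h1 h1' h2 h2' ⊢
  obtain ⟨i, rfl⟩ : ∃ i : Nat, ti = (i : Int) := ⟨ti.toNat, by omega⟩
  obtain ⟨j, rfl⟩ : ∃ j : Nat, tj = (j : Int) := ⟨tj.toNat, by omega⟩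
  obtain ⟨r', rfl⟩ : ∃ r' : Nat, r = (r' : Int) := ⟨r.toNat, by omega⟩
  obtain ⟨l', rfl⟩ : ∃ l' : Nat, l = (l' : Int) := ⟨l.toNat, by omega⟩
  have hi : i < st.length := by exact_mod_cast h1'
  have hrowlen : (PySem.List.pyGetD st (i : Int) []).length = L := by
    rw [PySem.List.pyGetD_eq_getElem st [] (by omega) h1']
    exact hrow _ (List.getElem_mem _)
  have hj : j < (PySem.List.pyGetD st (i : Int) []).length := by
    rw [hrowlen]; exact_mod_cast h2'
  unfold pvUpdate
  simp only
  rw [PySem.List.pyGetD_pySetD_natCast st i r' _ [] hi]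
  by_cases hri : r' = i
  · subst hri
    rw [if_pos rfl, PySem.List.pyGetD_pySetD_natCast _ j l' _ [] hj]
    by_cases hlj : l' = j
    · subst hlj
      rw [if_pos rfl]
      simp
    · rw [if_neg hlj, if_neg (by simp; omega)]
  · rw [if_neg hri, if_neg (by rintro ⟨h, -⟩; exact hri (by exact_mod_cast h.symm))]

-- the cell invariant over the whole fold
theorem pvFold_cell (n : Int) (L : Nat) (ts : List (Int × Int × Int))
    (hts : ∀ t ∈ ts, 0 ≤ t.1 ∧ t.1 < n ∧ 0 ≤ t.2.1 ∧ t.2.1 < (L : Int))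
    (st : List (List (List Int)))
    (hlen : (st.length : Int) = n) (hrow : ∀ row ∈ st, row.length = L)
    (r l : Int) (hr : 0 ≤ r) (hr' : r < n) (hl : 0 ≤ l) (hl' : l < (L : Int)) :
    PySem.List.pyGetD (PySem.List.pyGetD (ts.foldl pvUpdate st) r []) l []
      = ((ts.filter (fun t => t.1 = r ∧ t.2.1 = l)).map (fun t => t.2.2)).foldl
          (fun cell c => if c ∈ cell then cell else cell ++ [c])
          (PySem.List.pyGetD (PySem.List.pyGetD st r []) l []) := by
  induction ts generalizing st with
  | nil => simp
  | cons t rest ih =>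
    have ht := hts t (by simp)
    have hsh := pvUpdate_shape n L st t hlen hrow ht
    have hcell := pvUpdate_cell st t L hrow ht.1 (by omega) ht.2.2.1 ht.2.2.2
      r l hr (by omega) hl hl'
    simp only [List.foldl_cons, List.filter_cons]
    rw [ih (fun t' ht' => hts t' (by simp [ht'])) (pvUpdate st t) hsh.1 hsh.2, hcell]
    by_cases hp : t.1 = r ∧ t.2.1 = l
    · rw [if_pos hp, if_pos (show decide (t.1 = r ∧ t.2.1 = l) = true by simp [hp])]
      simp
    · rw [if_neg hp, if_neg (show ¬ decide (t.1 = r ∧ t.2.1 = l) = true by simp [hp])]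

-- A's membership-append step is PySem.Set.add
theorem pvStep_eq_add (cell : List Int) (c : Int) :
    (if c ∈ cell then cell else cell ++ [c]) = PySem.Set.add cell c := by
  simp [PySem.Set.add, PySem.Set.contains]

-- pyRange over an Int bound, as a Nat range
theorem pvPyRangeInt (n : Int) :
    PySem.List.pyRange 0 n 1 = (List.range n.toNat).map (fun k : Nat => (k : Int)) := by
  by_cases h : n ≤ 0
  · have h0 : n.toNat = 0 := by omega
    rw [h0]
    simp [pysem, h]
  · conv_lhs => rw [show n = ((n.toNat : Nat) : Int) by omega]
    exact PySem.List.pyRange_zero_natCast n.toNat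

-- ===== VERDICT (by name: the statement is the Claim_ definition above) =====

theorem mapReservedSeatsToArray_spec : Claim_equal_mapReservedSeatsToArray := by
  unfold Claim_equal_mapReservedSeatsToArray
  intro n seats lots _hdom hpre
  unfold Spec_mapReservedSeatsToArray
  unfold Pre_mapReservedSeatsToArray at hpre
  unfold mapReservedSeatsToArray mapReservedSeatsToArray_alt
  simp only
  rw [pvAFold_ok n lots seats hpre (pvAInit n lots),
      pvBFold_ok n lots seats hpre []]
  simp only [List.nil_append]
  set ts := seats.map (pvTripOf lots) with hts_def
  set N := n.toNat with hN
  set L := lots.length with hL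
  set S := ts.foldl pvUpdate (pvAInit n lots) with hS_def
  have htsr : ∀ t ∈ ts, 0 ≤ t.1 ∧ t.1 < (N : Int) ∧ 0 ≤ t.2.1 ∧ t.2.1 < (L : Int) := by
    intro t ht
    rw [hts_def] at ht
    obtain ⟨s, hs, rfl⟩ := List.mem_map.mp ht
    have h := pvTripOf_range n lots s (hpre s hs)
    exact ⟨h.1, by omega, h.2.2.1, by simpa [hL] using h.2.2.2⟩
  have hR : PySem.List.pyRange 0 n 1 = (List.range N).map (fun k : Nat => (k : Int)) := pvPyRangeInt n
  have hR2 : PySem.List.pyRange 0 ((L : Nat) : Int) 1 = (List.range L).map (fun k : Nat => (k : Int)) := by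
    rw [PySem.List.pyRange_zero_natCast]
  have hst0len : ((pvAInit n lots).length : Int) = (N : Int) := by
    simp [pvAInit, hR]
  have hst0row : ∀ row ∈ pvAInit n lots, row.length = L := by
    intro row h
    unfold pvAInit at h
    obtain ⟨_, _, rfl⟩ := List.mem_map.mp h
    simp [hL]
  have hsh := pvFold_shape (N : Int) L ts htsr (pvAInit n lots) hst0len hst0row
  rw [← hS_def] at hsh
  have hSlen : S.length = N := by exact_mod_cast hsh.1
  have hfun : (fun (cell : List Int) (c : Int) => if c ∈ cell then cell else cell ++ [c])
      = fun (cell : List Int) (c : Int) => PySem.Set.add cell c := by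
    funext cell c
    exact pvStep_eq_add cell c
  have hScell : ∀ (i j : Nat) (hi : i < N) (hj : j < L)
      (h1 : i < S.length) (h2 : j < (S[i]'h1).length),
      (S[i]'h1)[j]'h2
        = PySem.Set.ofList ((ts.filter (fun t => t.1 = (i : Int) ∧ t.2.1 = (j : Int))).map (fun t => t.2.2)) := by
    intro i j hi hj h1 h2
    have hrowlen : (S[i]'h1).length = L := hsh.2 _ (List.getElem_mem h1)
    have hc := pvFold_cell (N : Int) L ts htsr (pvAInit n lots) hst0len hst0row
      (i : Int) (j : Int) (by omega) (by exact_mod_cast hi) (by omega) (by exact_mod_cast hj)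
    rw [← hS_def] at hc
    have hpg1 : PySem.List.pyGetD S (i : Int) [] = S[i]'h1 := by
      rw [PySem.List.pyGetD_eq_getElem S [] (by omega) (by rw [hSlen]; exact_mod_cast hi)]
      simp
    rw [hpg1] at hc
    have hpg2 : PySem.List.pyGetD (S[i]'h1) (j : Int) [] = (S[i]'h1)[j]'h2 := by
      rw [PySem.List.pyGetD_eq_getElem (S[i]'h1) [] (by omega) (by rw [hrowlen]; exact_mod_cast hj)]
      simp
    rw [hpg2] at hc
    -- the initial cell is []
    have hi0 : i < (pvAInit n lots).length := by
      have : (pvAInit n lots).length = N := by exact_mod_cast hst0len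
      omega
    have hpg3 : PySem.List.pyGetD (pvAInit n lots) (i : Int) [] = (pvAInit n lots)[i]'hi0 := by
      rw [PySem.List.pyGetD_eq_getElem (pvAInit n lots) [] (by omega)
        (by exact_mod_cast hst0len ▸ (by exact_mod_cast hi : (i : Int) < (N : Int)))]
      simp
    rw [hpg3] at hc
    have hrow0 : (pvAInit n lots)[i]'hi0 = lots.map (fun _ => ([] : List Int)) := by
      simp [pvAInit, hR]
    rw [hrow0] at hc
    have hcell0 : PySem.List.pyGetD (lots.map (fun _ => ([] : List Int))) (j : Int) [] = [] := by
      rw [PySem.List.pyGetD_eq_getElem (lots.map (fun _ => ([] : List Int))) [] (by omega)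
        (by simp; exact_mod_cast hj)]
      simp
    rw [hcell0] at hc
    rw [hc, hfun, PySem.Set.ofList_eq_foldl]
  -- assemble the two outputs
  apply List.ext_getElem
  · simp [hSlen, hR]
  · intro i h1 h2
    have hi : i < N := by simpa [hSlen] using h1
    have hiS : i < S.length := by omega
    simp only [hR, List.getElem_map, List.getElem_range]
    have hrowlen : (S[i]'hiS).length = L := hsh.2 _ (List.getElem_mem hiS)
    apply List.ext_getElem
    · simp [hrowlen, hL]
    · intro j hj1 hj2
      have hj : j < L := by simpa [hrowlen] using hj1
      simp only [hR2, List.getElem_map, List.getElem_range]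
      rw [hScell i j hi hj hiS (by omega)]
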